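-- pv_equiv track=rewrite | github.com/Global-Health-Engineering/autoclean | Functions/DateTime_Standardization.py | _validate_text_month_format
-- ===== SOURCE A (Python) =====
-- def _validate_text_month_format (value_str: str) -> bool:
--     """
--     Check if text-month format date (value_str) is valid (needs 2 numerical values (day, year))
--
--     Returns:
--         True if text-month format date (value_str) is valid, otherwise false
--
--     Note: Assuming here, value_str is text-month format
--     """
--
--     # Count numerical values in text-month format
--     numbers = [] # List to store numerical values
--     current_num = "" # Used as temporary storage
--     for char in value_str:
--         # If character is digit store it in current_num
--         if char.isdigit():
--             current_num += char
--         else: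
--             # If current_num is not empty and current character is not a digit, current_num stores a numerical value
--             # Hence append it to numbers and reset current_num
--             if len(current_num) > 0:
--                 numbers.append(current_num)
--                 current_num = ""
--
--     # If a numerical value is at the end its still saved in current_num and not appended to numbers
--     # Hence append it to numbers
--     if len(current_num) > 0:
--         numbers.append(current_num)
--
--     if len(numbers) == 2:
--         return True
--
--     return False
-- ===== SOURCE B (Python) =====
-- def _validate_text_month_format(value_str: str) -> bool:
--     # Count "rising edges": positions where a digit follows a non-digit.
--     # Each maximal digit group contributes exactly one edge, so the edge
--     # count equals the number of numeric groups.  Stateless pairwise scan.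
--     padded = " " + value_str
--     return sum(c.isdigit() and not p.isdigit() for p, c in zip(padded, value_str)) == 2
-- ===== Notes on version B (the rewrite author's own statement) =====
-- stated objective: alternative
-- what changed: B replaces A's stateful buffer loop that accumulates digit substrings into a list with a stateless pairwise scan: it zips the string with itself shifted by one and counts rising edges (digit after non-digit), which equals the number of numeric groups.
import Mathlib
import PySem

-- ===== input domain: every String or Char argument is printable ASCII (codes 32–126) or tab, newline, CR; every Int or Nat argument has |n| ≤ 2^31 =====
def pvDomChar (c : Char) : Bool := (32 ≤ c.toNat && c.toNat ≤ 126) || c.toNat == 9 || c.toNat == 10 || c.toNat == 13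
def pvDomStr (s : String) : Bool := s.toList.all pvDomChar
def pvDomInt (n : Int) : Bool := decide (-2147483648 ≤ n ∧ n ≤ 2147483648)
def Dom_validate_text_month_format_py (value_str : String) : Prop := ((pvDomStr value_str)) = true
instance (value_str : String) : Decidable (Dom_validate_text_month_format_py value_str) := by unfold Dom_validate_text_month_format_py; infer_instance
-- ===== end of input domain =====

-- B counts rising edges (digit after non-digit) in a stateless pairwise zip, instead of A's
-- buffer-accumulating run loop; same values everywhere (alternative formulation, not faster).

-- ===== PORT A =====
-- state = (numbers, current_num); the for-loop is a foldl over the characters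
def validate_text_month_format_py (value_str : String) : Bool :=
  let st := value_str.toList.foldl
    (fun (st : List String × List Char) c =>
      if PySem.Chars.isdigit c then (st.1, st.2 ++ [c])
      else if st.2.length > 0 then (st.1 ++ [String.ofList st.2], []) else st)
    ([], [])
  let numbers := if st.2.length > 0 then st.1 ++ [String.ofList st.2] else st.1
  numbers.length == 2

-- ===== PORT B =====
-- padded = " " + value_str; sum over zip(padded, value_str) of (c.isdigit() and not p.isdigit())
def validate_text_month_format_py_alt (value_str : String) : Bool :=
  let padded := ' ' :: value_str.toList
  ((List.zip padded value_str.toList).foldl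
      (fun (acc : Nat) pc =>
        acc + (if PySem.Chars.isdigit pc.2 && !PySem.Chars.isdigit pc.1 then 1 else 0))
      0) == 2

-- ===== PRECONDITION & SPEC =====
def Spec_validate_text_month_format_py (value_str : String) (out : Bool) : Prop := out = validate_text_month_format_py_alt value_str
instance (value_str : String) (out : Bool) : Decidable (Spec_validate_text_month_format_py value_str out) := by unfold Spec_validate_text_month_format_py; infer_instance

-- ===== CLAIM (what is proved, stated in full; the proofs are below) =====
def Claim_equal_validate_text_month_format_py : Prop := ∀ (value_str : String), Dom_validate_text_month_format_py value_str → Spec_validate_text_month_format_py value_str (validate_text_month_format_py value_str)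

-- ===== LEMMAS AND PROOFS =====

-- number of "flush" events (maximal digit runs) in l, given whether we are currently inside a digit run
def pvRunsAux (l : List Char) (inRun : Bool) : Nat :=
  match l with
  | [] => if inRun then 1 else 0
  | c :: cs =>
    if PySem.Chars.isdigit c then pvRunsAux cs true
    else (if inRun then 1 else 0) + pvRunsAux cs false

-- rising-edge count of l with previous character p
def pvEdges (p : Char) (l : List Char) : Nat :=
  match l with
  | [] => 0
  | c :: cs => (if PySem.Chars.isdigit c && !PySem.Chars.isdigit p then 1 else 0) + pvEdges c cs

lemma pvRunsAux_eq_edges (p : Char) (l : List Char) :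
    pvRunsAux l (PySem.Chars.isdigit p)
      = pvEdges p l + (if PySem.Chars.isdigit p then 1 else 0) := by
  induction l generalizing p with
  | nil => simp [pvRunsAux, pvEdges]
  | cons c cs ih =>
    have ihc := ih c
    by_cases h : PySem.Chars.isdigit c = true <;>
      by_cases hp : PySem.Chars.isdigit p = true <;>
        simp [pvRunsAux, pvEdges, h, hp] at ihc ⊢ <;> omega

-- B's fold accumulates the rising-edge count
lemma pvBFold_edges (l : List Char) (p : Char) (acc : Nat) :
    (List.zip (p :: l) l).foldl
        (fun (acc : Nat) pc =>
          acc + (if PySem.Chars.isdigit pc.2 && !PySem.Chars.isdigit pc.1 then 1 else 0))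
        acc
      = acc + pvEdges p l := by
  induction l generalizing p acc with
  | nil => simp [pvEdges]
  | cons c cs ih =>
    simp only [List.zip_cons_cons, List.foldl_cons, pvEdges]
    rw [ih]
    omega

-- A's loop invariant: the final numbers-list length is the starting length plus the flush count
lemma pvAFold_length (l : List Char) (nums : List String) (cur : List Char) :
    (let st := l.foldl
        (fun (st : List String × List Char) c =>
          if PySem.Chars.isdigit c then (st.1, st.2 ++ [c])
          else if st.2.length > 0 then (st.1 ++ [String.ofList st.2], []) else st)
        (nums, cur)
     (if st.2.length > 0 then st.1 ++ [String.ofList st.2] else st.1).length)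
    = nums.length + pvRunsAux l (decide (0 < cur.length)) := by
  induction l generalizing nums cur with
  | nil =>
    simp only [List.foldl_nil, pvRunsAux]
    split_ifs with h <;> simp_all
  | cons c cs ih =>
    simp only [List.foldl_cons]
    by_cases h : PySem.Chars.isdigit c = true
    · simp only [h, if_true]
      rw [ih]
      simp [pvRunsAux, h]
    · simp only [h, if_false, Bool.false_eq_true]
      by_cases hc : 0 < cur.length
      · simp only [hc, if_true]
        rw [ih]
        simp [pvRunsAux, h]
        omega
      · simp only [hc, if_false]
        rw [ih]
        simp [pvRunsAux, h, hc]

-- ===== VERDICT (by name: the statement is the Claim_ definition above) =====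
theorem validate_text_month_format_py_spec : Claim_equal_validate_text_month_format_py := by
  intro s _
  unfold Spec_validate_text_month_format_py validate_text_month_format_py validate_text_month_format_py_alt
  dsimp only
  have hA := pvAFold_length s.toList [] []
  simp only [List.length_nil, Nat.zero_add] at hA
  rw [hA, pvBFold_edges s.toList ' ' 0]
  have hsp : PySem.Chars.isdigit ' ' = false := by decide
  have := pvRunsAux_eq_edges ' ' s.toList
  rw [hsp] at this
  simp [this]
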